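-- pv_equiv track=rewrite | github.com/TheGrumpyToad/shane-s-code-repository | friday.py | count_fridays
-- ===== SOURCE A (Python) =====
-- def is_leap_year(year):
--     if year % 4 == 0:
--         if year % 100 == 0:
--             return year % 400 == 0
--         return True
--     return False
--
-- def count_fridays(N):
--     month_days = [31, 28, 31, 30, 31, 30, 31, 31, 30, 31, 30, 31]
--     week_day_counts = [0] * 7
--     current_weekday = 0
--     for year in range(1900, 1900 + N):
--         for month in range(12):
--             if month == 1 and is_leap_year(year):
--                 month_days[1] = 29
--             else:
--                 month_days[1] = 28
--             for day in range(1, month_days[month] + 1):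
--                 if day == 13:
--                     week_day_counts[current_weekday] += 1
--                 current_weekday = (current_weekday + 1) % 7
--     return week_day_counts
-- ===== SOURCE B (Python) =====
-- def count_fridays(N):
--     # Per-month weekday arithmetic: the 13th of a month falls on (wd + 12) % 7
--     # where wd is the weekday of the 1st; advance wd by the month length mod 7.
--     counts = [0] * 7
--     wd = 0
--     for year in range(1900, 1900 + N):
--         leap = year % 4 == 0 and (year % 100 != 0 or year % 400 == 0)
--         for days in (31, 29 if leap else 28, 31, 30, 31, 30, 31, 31, 30, 31, 30, 31):
--             counts[(wd + 12) % 7] += 1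
--             wd = (wd + days) % 7
--     return counts
-- ===== Notes on version B (the rewrite author's own statement) =====
-- stated objective: faster
-- what changed: B drops A's day-by-day scan (365 iterations per year) and advances the weekday per month with modular arithmetic: the 13th falls on (wd+12)%7 and the weekday of the 1st advances by the month length mod 7, so each year takes 12 constant-time steps instead of ~365.
import Mathlib
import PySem

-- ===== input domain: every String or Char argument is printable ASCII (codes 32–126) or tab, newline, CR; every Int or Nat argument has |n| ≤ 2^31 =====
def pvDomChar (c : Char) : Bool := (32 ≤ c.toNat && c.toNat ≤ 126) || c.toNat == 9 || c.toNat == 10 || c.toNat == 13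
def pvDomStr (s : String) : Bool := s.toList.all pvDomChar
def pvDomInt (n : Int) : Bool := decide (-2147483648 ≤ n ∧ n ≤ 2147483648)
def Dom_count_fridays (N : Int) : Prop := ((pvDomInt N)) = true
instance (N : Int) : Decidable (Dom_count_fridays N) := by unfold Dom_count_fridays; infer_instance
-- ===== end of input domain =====

-- B replaces A's day-by-day scan with per-month weekday arithmetic ((wd + 12) % 7 is the 13th's
-- weekday; the weekday of the 1st advances by the month length mod 7): same year loop, far fewer steps.

-- ===== PORT A =====
def is_leap_year (year : Int) : Bool :=
  if PySem.Int.mod year 4 == 0 then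
    (if PySem.Int.mod year 100 == 0 then PySem.Int.mod year 400 == 0 else true)
  else false

-- week_day_counts[current_weekday] += 1 : current_weekday is always 0 or a Python %7, i.e. in
-- [0,7), so List.set at .toNat with the pyGetD read is the exact in-range Python item assignment.
def aDayStep (s : List Int × List Int × Int) (day : Int) : List Int × List Int × Int :=
  let wdc := if day == 13 then
      s.2.1.set s.2.2.toNat (PySem.List.pyGetD s.2.1 s.2.2 0 + 1)
    else s.2.1
  (s.1, wdc, PySem.Int.mod (s.2.2 + 1) 7)

def aMonthStep (year : Int) (s : List Int × List Int × Int) (month : Int) :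
    List Int × List Int × Int :=
  let md := if month == 1 && is_leap_year year then s.1.set 1 29 else s.1.set 1 28
  (PySem.List.pyRange 1 (PySem.List.pyGetD md month 0 + 1) 1).foldl aDayStep (md, s.2)

def aYearStep (s : List Int × List Int × Int) (year : Int) : List Int × List Int × Int :=
  (PySem.List.pyRange 0 12 1).foldl (aMonthStep year) s

def count_fridays (N : Int) : List Int :=
  ((PySem.List.pyRange 1900 (1900 + N) 1).foldl aYearStep
    ([31, 28, 31, 30, 31, 30, 31, 31, 30, 31, 30, 31], List.replicate 7 (0 : Int), (0 : Int))).2.1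

-- ===== PORT B =====
def leap_alt (y : Int) : Bool :=
  PySem.Int.mod y 4 == 0 && (PySem.Int.mod y 100 != 0 || PySem.Int.mod y 400 == 0)

def pvMonths (year : Int) : List Int :=
  [31, if leap_alt year then 29 else 28, 31, 30, 31, 30, 31, 31, 30, 31, 30, 31]

-- counts[(wd + 12) % 7] += 1 : the index is a Python %7, in [0,7), so List.set at .toNat is exact.
def bMonthStep (s : List Int × Int) (days : Int) : List Int × Int :=
  (s.1.set (PySem.Int.mod (s.2 + 12) 7).toNat
      (PySem.List.pyGetD s.1 (PySem.Int.mod (s.2 + 12) 7) 0 + 1),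
   PySem.Int.mod (s.2 + days) 7)

def bYearStep (s : List Int × Int) (year : Int) : List Int × Int :=
  (pvMonths year).foldl bMonthStep s

def count_fridays_alt (N : Int) : List Int :=
  ((PySem.List.pyRange 1900 (1900 + N) 1).foldl bYearStep
    (List.replicate 7 (0 : Int), (0 : Int))).1

-- ===== PRECONDITION & SPEC =====
def Spec_count_fridays (N : Int) (out : List Int) : Prop := out = count_fridays_alt N
instance (N : Int) (out : List Int) : Decidable (Spec_count_fridays N out) := by unfold Spec_count_fridays; infer_instance

-- ===== CLAIM (what is proved, stated in full; the proofs are below) =====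
def Claim_equal_count_fridays : Prop := ∀ (N : Int), Dom_count_fridays N → Spec_count_fridays N (count_fridays N)

-- ===== LEMMAS AND PROOFS =====

lemma hm7 : ∀ a : Int, PySem.Int.mod a 7 = a % 7 := fun a => PySem.Int.mod_eq_emod_of_pos (by norm_num)

-- a nonempty run of days none of which is 13 only advances the weekday (mod 7)
lemma adv' (t : List Int) (d : Int) (hd : d ≠ 13) (ht : (13 : Int) ∉ t) (md wdc : List Int) (wd : Int) :
    (d :: t).foldl aDayStep (md, wdc, wd) = (md, wdc, PySem.Int.mod (wd + 1 + t.length) 7) := by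
  induction t generalizing wd d with
  | nil => simp [aDayStep, hd]
  | cons e t ih =>
    rw [List.foldl_cons]
    show (e :: t).foldl aDayStep (md, (if (d == 13) = true then _ else wdc), PySem.Int.mod (wd + 1) 7) = _
    rw [show (d == (13:Int)) = false by simp [hd]]
    simp only [Bool.false_eq_true, if_false]
    rw [ih e (by rintro rfl; exact ht (List.mem_cons_self ..)) (fun hmem => ht (List.mem_cons_of_mem _ hmem))]
    refine Prod.ext rfl (Prod.ext rfl ?_)
    simp only [hm7, List.length_cons]
    push_cast
    omega

-- one month of A's day loop (length L ≥ 14) is exactly one bMonthStep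
lemma dayfold (L : Int) (hL : 14 ≤ L) (md wdc : List Int) (wd : Int) :
    (PySem.List.pyRange 1 (L + 1) 1).foldl aDayStep (md, wdc, wd)
      = (md, bMonthStep (wdc, wd) L) := by
  rw [PySem.List.pyRange_one_append 1 13 (L + 1) (by omega) (by omega),
      PySem.List.pyRange_one_append 13 14 (L + 1) (by omega) (by omega),
      List.foldl_append, List.foldl_append]
  rw [PySem.List.pyRange_one_cons (show (1:Int) < 13 by omega)]
  rw [adv' _ 1 (by omega) (by rw [PySem.List.mem_pyRange_one]; omega)]
  have e1 : PySem.Int.mod (wd + 1 + (PySem.List.pyRange (1+1) 13 1).length) 7 = PySem.Int.mod (wd + 12) 7 := by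
    rw [PySem.List.length_pyRange_one, hm7, hm7]; omega
  rw [e1]
  rw [PySem.List.pyRange_one_cons (show (13:Int) < 14 by omega),
      show PySem.List.pyRange (13+1) 14 1 = [] from PySem.List.pyRange_one_eq_nil (by omega)]
  rw [List.foldl_cons, List.foldl_nil]
  show (PySem.List.pyRange 14 (L + 1) 1).foldl aDayStep
      (md, (if ((13:Int) == 13) = true then _ else _), PySem.Int.mod (PySem.Int.mod (wd + 12) 7 + 1) 7) = _
  rw [if_pos (by decide)]
  rw [PySem.List.pyRange_one_cons (show (14:Int) < L + 1 by omega)]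
  rw [adv' _ 14 (by omega) (by rw [PySem.List.mem_pyRange_one]; omega)]
  unfold bMonthStep
  refine Prod.ext rfl (Prod.ext rfl ?_)
  simp only [hm7, PySem.List.length_pyRange_one]
  omega

lemma leap_eq (y : Int) : is_leap_year y = leap_alt y := by
  unfold is_leap_year leap_alt
  cases h4 : (PySem.Int.mod y 4 == 0) <;> cases h100 : (PySem.Int.mod y 100 == 0) <;>
    cases h400 : (PySem.Int.mod y 400 == 0) <;> simp_all

-- one non-February month of A is one bMonthStep
lemma monthA (year : Int) (md : List Int) (s : List Int × Int) (m : Int)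
    (hm : (m == (1:Int) && is_leap_year year) = false) (L : Int)
    (hL : PySem.List.pyGetD (md.set 1 28) m 0 = L) (h14 : 14 ≤ L) :
    aMonthStep year (md, s) m = (md.set 1 28, bMonthStep s L) := by
  obtain ⟨wdc, wd⟩ := s
  unfold aMonthStep
  simp only [hm, Bool.false_eq_true, if_false]
  rw [hL, dayfold L h14]

-- February of A is one bMonthStep of length 29 or 28
lemma monthFeb (year : Int) (md : List Int) (s : List Int × Int) (F : Int)
    (hF : F = if is_leap_year year then 29 else 28)
    (hL : PySem.List.pyGetD (md.set 1 F) 1 0 = F) :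
    aMonthStep year (md, s) 1 = (md.set 1 F, bMonthStep s F) := by
  obtain ⟨wdc, wd⟩ := s
  unfold aMonthStep
  by_cases hl : is_leap_year year
  · have hF' : F = 29 := by rw [hF, if_pos hl]
    rw [hF'] at hL ⊢
    simp only [hl, Bool.and_true, beq_self_eq_true, if_true]
    rw [hL, dayfold 29 (by omega)]
  · have hF' : F = 28 := by rw [hF, if_neg hl]
    rw [hF'] at hL ⊢
    simp only [hl, Bool.and_false, Bool.false_eq_true, if_false]
    rw [hL, dayfold 28 (by omega)]

-- one year of A's month loop is one bYearStep (A's month_days list ends the year reset to 28)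
lemma yearfold (year : Int) (c : Int) (wdc : List Int) (wd : Int) :
    (PySem.List.pyRange 0 12 1).foldl (aMonthStep year)
        (([31, 28, 31, 30, 31, 30, 31, 31, 30, 31, 30, 31] : List Int).set 1 c, wdc, wd)
      = (([31, 28, 31, 30, 31, 30, 31, 31, 30, 31, 30, 31] : List Int).set 1 28,
         bYearStep (wdc, wd) year) := by
  have hr : PySem.List.pyRange 0 12 1 = [0,1,2,3,4,5,6,7,8,9,10,11] := by decide
  rw [hr]
  unfold bYearStep pvMonths
  rw [← leap_eq]
  set F : Int := if is_leap_year year then 29 else 28 with hF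
  simp only [List.foldl_cons, List.foldl_nil]
  rw [monthA year _ _ 0 (by simp) 31 (by rw [List.set_set]; decide) (by omega), List.set_set]
  rw [monthFeb year _ _ F hF (by rw [List.set_set, hF]; split_ifs <;> decide), List.set_set]
  rw [monthA year _ _ 2 (by simp) 31 (by rw [List.set_set]; decide) (by omega), List.set_set]
  rw [monthA year _ _ 3 (by simp) 30 (by rw [List.set_set]; decide) (by omega), List.set_set]
  rw [monthA year _ _ 4 (by simp) 31 (by rw [List.set_set]; decide) (by omega), List.set_set]
  rw [monthA year _ _ 5 (by simp) 30 (by rw [List.set_set]; decide) (by omega), List.set_set]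
  rw [monthA year _ _ 6 (by simp) 31 (by rw [List.set_set]; decide) (by omega), List.set_set]
  rw [monthA year _ _ 7 (by simp) 31 (by rw [List.set_set]; decide) (by omega), List.set_set]
  rw [monthA year _ _ 8 (by simp) 30 (by rw [List.set_set]; decide) (by omega), List.set_set]
  rw [monthA year _ _ 9 (by simp) 31 (by rw [List.set_set]; decide) (by omega), List.set_set]
  rw [monthA year _ _ 10 (by simp) 30 (by rw [List.set_set]; decide) (by omega), List.set_set]
  rw [monthA year _ _ 11 (by simp) 31 (by rw [List.set_set]; decide) (by omega), List.set_set]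

-- the whole year loop, for any list of years
lemma mainfold (ys : List Int) (c : Int) (wdc : List Int) (wd : Int) :
    (ys.foldl aYearStep
        (([31, 28, 31, 30, 31, 30, 31, 31, 30, 31, 30, 31] : List Int).set 1 c, wdc, wd)).2
      = ys.foldl bYearStep (wdc, wd) := by
  induction ys generalizing c wdc wd with
  | nil => rfl
  | cons y t ih =>
    rw [List.foldl_cons, List.foldl_cons]
    show (t.foldl aYearStep ((PySem.List.pyRange 0 12 1).foldl (aMonthStep y) _)).2 = _
    rw [yearfold]
    have hp : bYearStep (wdc, wd) y = ((bYearStep (wdc, wd) y).1, (bYearStep (wdc, wd) y).2) := rfl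
    rw [hp, ih]

-- ===== VERDICT (by name: the statement is the Claim_ definition above) =====
theorem count_fridays_spec : Claim_equal_count_fridays := by
  intro N _
  unfold Spec_count_fridays count_fridays count_fridays_alt
  rw [show ([31, 28, 31, 30, 31, 30, 31, 31, 30, 31, 30, 31] : List Int)
      = ([31, 28, 31, 30, 31, 30, 31, 31, 30, 31, 30, 31] : List Int).set 1 28 from by decide]
  exact congrArg Prod.fst (mainfold (PySem.List.pyRange 1900 (1900 + N) 1) 28 (List.replicate 7 0) 0)
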